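-- pv_equiv track=rewrite | github.com/ydb-platform/ydb | contrib/python/google-adk/google/adk/tools/google_api_tool/googleapi_to_openapi_converter.py | _extract_path_parameters
-- ===== SOURCE A (Python) =====
-- from typing import List
--
-- def _extract_path_parameters(path: str) -> List[str]:
--   """Extract path parameters from a URL path.
--
--   Args:
--       path: The URL path with path parameters
--
--   Returns:
--       List of parameter names
--   """
--   params = []
--   segments = path.split("/")
--
--   for segment in segments:
--     # Google APIs often use {param} format for path parameters
--     if segment.startswith("{") and segment.endswith("}"):
--       param_name = segment[1:-1]
--       params.append(param_name)
--
--   return params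
-- ===== SOURCE B (Python) =====
-- from typing import List
--
-- def _extract_path_parameters(path: str) -> List[str]:
--   """Single streaming pass over the characters: build the current segment,
--   flush it at each '/' (and at the end), emitting its interior when it is a
--   complete {param} segment. No intermediate list of segments."""
--   params = []
--   cur = []
--   for ch in path + "/":
--     if ch == "/":
--       if len(cur) >= 2 and cur[0] == "{" and cur[-1] == "}":
--         params.append("".join(cur[1:-1]))
--       cur = []
--     else:
--       cur.append(ch)
--   return params
-- ===== Notes on version B (the rewrite author's own statement) =====
-- stated objective: alternative
-- what changed: Replaces split('/')-then-filter over a materialised segment list by a single character-level scan that maintains the current segment and flushes it at each '/', emitting {param} interiors on the fly.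
import Mathlib
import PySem

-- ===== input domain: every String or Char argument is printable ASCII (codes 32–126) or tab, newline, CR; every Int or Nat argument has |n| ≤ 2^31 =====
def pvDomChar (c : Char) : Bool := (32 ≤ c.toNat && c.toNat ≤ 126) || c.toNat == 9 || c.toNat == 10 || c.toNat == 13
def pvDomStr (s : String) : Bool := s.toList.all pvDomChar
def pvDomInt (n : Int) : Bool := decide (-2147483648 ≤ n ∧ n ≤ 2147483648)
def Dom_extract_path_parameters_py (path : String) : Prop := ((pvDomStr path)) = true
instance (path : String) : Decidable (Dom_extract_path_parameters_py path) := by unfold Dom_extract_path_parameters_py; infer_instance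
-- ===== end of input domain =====

-- B replaces split('/')-then-filter with a single streaming character scan; objective: alternative (same cost).

-- ===== PORT A =====
-- A: split the path on "/", keep segments that start with "{" and end with "}", strip the braces.
def extract_path_parameters_py (path : String) : List String :=
  let segments := PySem.Chars.splitOn path.toList ['/']
  segments.foldl (fun params segment =>
    if PySem.Chars.startswith segment ['{'] && PySem.Chars.endswith segment ['}'] then
      params ++ [String.mk (PySem.Chars.slice segment (some 1) (some (-1)))]
    else params) []

-- ===== PORT B =====
-- B: one pass over path + "/" carrying (params, current segment); flush at each '/'.
def extract_path_parameters_py_alt (path : String) : List String :=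
  ((path.toList ++ ['/']).foldl (fun st ch =>
    if ch = '/' then
      (if 2 ≤ st.2.length ∧ st.2.head? = some '{' ∧ st.2.getLast? = some '}' then
         st.1 ++ [String.mk (PySem.List.slice st.2 (some 1) (some (-1)))]
       else st.1, [])
    else (st.1, st.2 ++ [ch])) ([], [])).1

-- ===== PRECONDITION & SPEC =====
def Spec_extract_path_parameters_py (path : String) (out : List String) : Prop := out = extract_path_parameters_py_alt path
instance (path : String) (out : List String) : Decidable (Spec_extract_path_parameters_py path out) := by unfold Spec_extract_path_parameters_py; infer_instance

-- ===== CLAIM (what is proved, stated in full; the proofs are below) =====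
def Claim_equal_extract_path_parameters_py : Prop := ∀ (path : String), Dom_extract_path_parameters_py path → Spec_extract_path_parameters_py path (extract_path_parameters_py path)

-- ===== LEMMAS AND PROOFS =====

-- simple recursive characterisation of split on the single character '/'
def pvSegs : List Char → List (List Char)
  | [] => [[]]
  | c :: rest =>
      if c = '/' then [] :: pvSegs rest
      else
        match pvSegs rest with
        | [] => [[c]]
        | s :: ss => (c :: s) :: ss

def pvConsHead (x : List Char) : List (List Char) → List (List Char)
  | [] => [x]
  | s :: ss => (x ++ s) :: ss

lemma pvSegs_ne_nil (cs : List Char) : pvSegs cs ≠ [] := by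
  induction cs with
  | nil => simp [pvSegs]
  | cons c rest ih =>
    simp only [pvSegs]
    split
    · simp
    · cases h : pvSegs rest <;> simp

lemma pvConsHead_nil {ls : List (List Char)} (h : ls ≠ []) : pvConsHead [] ls = ls := by
  cases ls with
  | nil => exact absurd rfl h
  | cons s ss => simp [pvConsHead]

lemma pv_go (fuel : Nat) : ∀ (l cur : List Char) (acc : List (List Char)), l.length ≤ fuel →
    PySem.Chars.splitOn.go ['/'] fuel l cur acc
      = acc.reverse ++ pvConsHead cur.reverse (pvSegs l) := by
  induction fuel with
  | zero =>
    intro l cur acc h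
    have : l = [] := by cases l <;> simp_all
    subst this
    simp [PySem.Chars.splitOn.go, pvSegs, pvConsHead]
  | succ n ih =>
    intro l cur acc h
    cases l with
    | nil => simp [PySem.Chars.splitOn.go, pvSegs, pvConsHead]
    | cons c rest =>
      rw [PySem.Chars.splitOn.go]
      simp only [List.length_cons] at h
      by_cases hc : c = '/'
      · subst hc
        have hpre : List.isPrefixOf ['/'] ('/' :: rest) = true := by simp [List.isPrefixOf]
        rw [if_pos hpre]
        rw [show List.drop ['/'].length ('/' :: rest) = rest from rfl]
        rw [ih rest [] (cur.reverse :: acc) (by omega)]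
        rw [show pvSegs ('/' :: rest) = [] :: pvSegs rest from by simp [pvSegs]]
        cases hs : pvSegs rest with
        | nil => exact absurd hs (pvSegs_ne_nil rest)
        | cons s ss => simp [pvConsHead]
      · have hpre : List.isPrefixOf ['/'] (c :: rest) = false := by
          simp [List.isPrefixOf]; exact Ne.symm hc
        rw [if_neg (by simp [hpre])]
        rw [ih rest (c :: cur) acc (by omega)]
        rw [show pvSegs (c :: rest) = (match pvSegs rest with
              | [] => [[c]] | s :: ss => (c :: s) :: ss) from by simp [pvSegs, hc]]
        cases hs : pvSegs rest with
        | nil => exact absurd hs (pvSegs_ne_nil rest)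
        | cons s ss => simp [pvConsHead]

lemma splitOn_slash (cs : List Char) : PySem.Chars.splitOn cs ['/'] = pvSegs cs := by
  unfold PySem.Chars.splitOn
  rw [pv_go (cs.length + 1) cs [] [] (by omega)]
  simp [pvConsHead_nil (pvSegs_ne_nil cs)]

-- A's startswith/endswith test coincides with B's length/head/last test
lemma cond_eq (seg : List Char) :
    (PySem.Chars.startswith seg ['{'] && PySem.Chars.endswith seg ['}']) = true
      ↔ (2 ≤ seg.length ∧ seg.head? = some '{' ∧ seg.getLast? = some '}') := by
  rw [Bool.and_eq_true, PySem.Chars.startswith_iff, PySem.Chars.endswith_iff]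
  have hhd : ['{'] <+: seg ↔ seg.head? = some '{' := by
    cases seg with
    | nil => simp
    | cons a t => simp [List.cons_prefix_cons, eq_comm]
  have hla : ['}'] <:+ seg ↔ seg.getLast? = some '}' := by
    constructor
    · rintro ⟨u, rfl⟩; simp
    · intro h
      have hne : seg ≠ [] := by rintro rfl; simp at h
      refine ⟨seg.dropLast, ?_⟩
      rw [List.getLast?_eq_some_getLast hne] at h
      simp at h
      rw [← h]
      exact List.dropLast_append_getLast hne
  constructor
  · rintro ⟨hp, hs⟩
    have h1 := hhd.mp hp
    have h2 := hla.mp hs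
    refine ⟨?_, h1, h2⟩
    rcases seg with _ | ⟨a, _ | ⟨b, t⟩⟩
    · simp at h1
    · simp at h1 h2; simp [h1] at h2
    · simp
  · rintro ⟨_, h1, h2⟩
    exact ⟨hhd.mpr h1, hla.mpr h2⟩

-- A's fold body and B's fold body, as named functions
def pvF (params : List String) (segment : List Char) : List String :=
  if PySem.Chars.startswith segment ['{'] && PySem.Chars.endswith segment ['}'] then
    params ++ [String.mk (PySem.Chars.slice segment (some 1) (some (-1)))]
  else params

def pvStep (st : List String × List Char) (ch : Char) : List String × List Char :=
  if ch = '/' then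
    (if 2 ≤ st.2.length ∧ st.2.head? = some '{' ∧ st.2.getLast? = some '}' then
       st.1 ++ [String.mk (PySem.List.slice st.2 (some 1) (some (-1)))]
     else st.1, [])
  else (st.1, st.2 ++ [ch])

lemma flush_eq (acc : List String) (cur : List Char) :
    pvStep (acc, cur) '/' = (pvF acc cur, []) := by
  unfold pvStep pvF
  rw [if_pos rfl]
  by_cases h : 2 ≤ cur.length ∧ cur.head? = some '{' ∧ cur.getLast? = some '}'
  · rw [if_pos h, if_pos ((cond_eq cur).mpr h)]
    simp [PySem.Chars.slice_eq_listSlice]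
  · rw [if_neg h, if_neg (fun hb => h ((cond_eq cur).mp hb))]

lemma B_loop (cs : List Char) : ∀ (acc : List String) (cur : List Char),
    (List.foldl pvStep (acc, cur) (cs ++ ['/'])).1
      = List.foldl pvF acc (pvConsHead cur (pvSegs cs)) := by
  induction cs with
  | nil =>
    intro acc cur
    simp [flush_eq, pvSegs, pvConsHead]
  | cons c rest ih =>
    intro acc cur
    by_cases hc : c = '/'
    · subst hc
      simp only [List.cons_append, List.foldl_cons, flush_eq, ih]
      rw [show pvSegs ('/' :: rest) = [] :: pvSegs rest from by simp [pvSegs]]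
      cases hs : pvSegs rest with
      | nil => exact absurd hs (pvSegs_ne_nil rest)
      | cons s ss => simp [pvConsHead]
    · have h1 : pvStep (acc, cur) c = (acc, cur ++ [c]) := by simp [pvStep, hc]
      simp only [List.cons_append, List.foldl_cons, h1, ih]
      rw [show pvSegs (c :: rest) = (match pvSegs rest with
            | [] => [[c]] | s :: ss => (c :: s) :: ss) from by simp [pvSegs, hc]]
      cases hs : pvSegs rest with
      | nil => exact absurd hs (pvSegs_ne_nil rest)
      | cons s ss => simp [pvConsHead]

-- ===== VERDICT (by name: the statement is the Claim_ definition above) =====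
theorem extract_path_parameters_py_spec : Claim_equal_extract_path_parameters_py := by
  intro path _
  unfold Spec_extract_path_parameters_py extract_path_parameters_py extract_path_parameters_py_alt
  rw [splitOn_slash]
  have hB := B_loop path.toList [] []
  rw [pvConsHead_nil (pvSegs_ne_nil path.toList)] at hB
  rw [show (fun (st : List String × List Char) ch => if ch = '/' then
      (if 2 ≤ st.2.length ∧ st.2.head? = some '{' ∧ st.2.getLast? = some '}' then
         st.1 ++ [String.mk (PySem.List.slice st.2 (some 1) (some (-1)))]
       else st.1, [])
    else (st.1, st.2 ++ [ch])) = pvStep from rfl, hB]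
  rfl
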